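-- pv_equiv track=rewrite | github.com/5ystemVX/StarsectorTranslateTool | parse.py | __erase_hash_comment
-- ===== SOURCE A (Python) =====
-- from collections import deque
--
-- def __erase_hash_comment(lines: list[str]) -> list[str]:
--     result = []
--     # removes hashtag#-leading comments
--     for line in lines:
--         hashtag_index = len(line)
--         quote_stack = deque()
--         for i in range(0, len(line)):
--             if line[i] == '#' and len(quote_stack) == 0:
--                 hashtag_index = i
--                 break
--             elif line[i] == "'":
--                 if "'" in quote_stack:
--                     while "'" in quote_stack:
--                         quote_stack.pop()
--                 else:
--                     quote_stack.append("'")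
--             elif line[i] == '"':
--                 if '"' in quote_stack:
--                     while '"' in quote_stack:
--                         quote_stack.pop()
--                 else:
--                     quote_stack.append('"')
--         result.append(line[0: hashtag_index])
--     return result
-- ===== SOURCE B (Python) =====
-- def __erase_hash_comment(lines: list[str]) -> list[str]:
--     # DFA: the original's quote_stack can only ever be one of five values
--     # ([], ['], ["], [',"], [",']), so track that as a single state integer.
--     # O(1) per character instead of scanning/popping the deque.
--     ON_SQUOTE = (1, 0, 4, 0, 2)
--     ON_DQUOTE = (2, 3, 0, 1, 0)
--     result = []
--     for line in lines:
--         state = 0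
--         cut = len(line)
--         for i, ch in enumerate(line):
--             if ch == "'":
--                 state = ON_SQUOTE[state]
--             elif ch == '"':
--                 state = ON_DQUOTE[state]
--             elif ch == '#' and state == 0:
--                 cut = i
--                 break
--         result.append(line[:cut])
--     return result
-- ===== Notes on version B (the rewrite author's own statement) =====
-- stated objective: faster
-- what changed: Replaced the deque quote_stack (with repeated linear membership scans and pop-loops per character) by a 5-state DFA over a single integer, exploiting that the stack can only ever hold one of five values; O(1) per character.
import Mathlib
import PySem

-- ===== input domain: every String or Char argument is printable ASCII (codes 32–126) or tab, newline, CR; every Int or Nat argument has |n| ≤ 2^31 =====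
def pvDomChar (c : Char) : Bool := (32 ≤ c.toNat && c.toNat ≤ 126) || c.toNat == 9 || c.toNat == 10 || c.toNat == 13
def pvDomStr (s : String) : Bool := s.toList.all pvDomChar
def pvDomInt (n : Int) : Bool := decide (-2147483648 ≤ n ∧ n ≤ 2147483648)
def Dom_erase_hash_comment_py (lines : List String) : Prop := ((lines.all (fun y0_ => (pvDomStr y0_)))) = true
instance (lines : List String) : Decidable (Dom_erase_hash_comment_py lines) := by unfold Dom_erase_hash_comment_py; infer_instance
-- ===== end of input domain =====

-- B replaces A's deque of quote characters (linear membership scans + pop-loops)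
-- by a 5-state DFA with O(1) transitions per character; same return value.

-- ===== PORT A =====
-- while c in stack: stack.pop()   (top of the deque = head of the list)
def pvPopWhileMem (c : Char) : List Char → List Char
  | [] => []
  | x :: rest => if (x :: rest).contains c then pvPopWhileMem c rest else x :: rest

-- inner 'for i in range(0, len(line))' loop with break: returns hashtag_index
def pvHashIdxA (chars : List Char) (i : Nat) (st : List Char) (n : Nat) : Nat :=
  match chars with
  | [] => n
  | ch :: rest =>
    if ch = '#' ∧ st.length = 0 then i
    else if ch = '\'' then
      if st.contains '\'' then pvHashIdxA rest (i + 1) (pvPopWhileMem '\'' st) n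
      else pvHashIdxA rest (i + 1) ('\'' :: st) n
    else if ch = '"' then
      if st.contains '"' then pvHashIdxA rest (i + 1) (pvPopWhileMem '"' st) n
      else pvHashIdxA rest (i + 1) ('"' :: st) n
    else pvHashIdxA rest (i + 1) st n

def erase_hash_comment_py (lines : List String) : List String :=
  lines.map (fun line =>
    let chars := line.toList
    -- line[0 : hashtag_index]
    String.mk (PySem.List.slice chars (some (0 : Int))
      (some ((pvHashIdxA chars 0 [] chars.length : Nat) : Int))))

-- ===== PORT B =====
-- state = ON_SQUOTE[state]
def pvOnSquote (s : Nat) : Nat :=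
  match s with | 0 => 1 | 1 => 0 | 2 => 4 | 3 => 0 | _ => 2
-- state = ON_DQUOTE[state]
def pvOnDquote (s : Nat) : Nat :=
  match s with | 0 => 2 | 1 => 3 | 2 => 0 | 3 => 1 | _ => 0
-- inner 'for i, ch in enumerate(line)' loop with break: returns cut
def pvHashIdxB (chars : List Char) (i : Nat) (s : Nat) (n : Nat) : Nat :=
  match chars with
  | [] => n
  | ch :: rest =>
    if ch = '\'' then pvHashIdxB rest (i + 1) (pvOnSquote s) n
    else if ch = '"' then pvHashIdxB rest (i + 1) (pvOnDquote s) n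
    else if ch = '#' ∧ s = 0 then i
    else pvHashIdxB rest (i + 1) s n

def erase_hash_comment_py_alt (lines : List String) : List String :=
  lines.map (fun line =>
    let chars := line.toList
    -- line[:cut] with 0 ≤ cut ≤ len(line)
    String.mk (chars.take (pvHashIdxB chars 0 0 chars.length)))

-- ===== PRECONDITION & SPEC =====
def Spec_erase_hash_comment_py (lines : List String) (out : List String) : Prop := out = erase_hash_comment_py_alt lines
instance (lines : List String) (out : List String) : Decidable (Spec_erase_hash_comment_py lines out) := by unfold Spec_erase_hash_comment_py; infer_instance

-- ===== CLAIM (what is proved, stated in full; the proofs are below) =====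
def Claim_equal_erase_hash_comment_py : Prop := ∀ (lines : List String), Dom_erase_hash_comment_py lines → Spec_erase_hash_comment_py lines (erase_hash_comment_py lines)

-- ===== LEMMAS AND PROOFS =====

-- Invariant: A's quote_stack only ever takes five values; QRel maps each to B's state.
def QRel (st : List Char) (s : Nat) : Prop :=
  (st = [] ∧ s = 0) ∨ (st = ['\''] ∧ s = 1) ∨ (st = ['"'] ∧ s = 2) ∨
  (st = ['"', '\''] ∧ s = 3) ∨ (st = ['\'', '"'] ∧ s = 4)

theorem hashIdx_eq (chars : List Char) :
    ∀ (i : Nat) (st : List Char) (s : Nat) (n : Nat), QRel st s →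
      pvHashIdxA chars i st n = pvHashIdxB chars i s n := by
  induction chars with
  | nil => intro i st s n _; rfl
  | cons ch rest ih =>
    intro i st s n hrel
    rcases hrel with ⟨hst, hs⟩ | ⟨hst, hs⟩ | ⟨hst, hs⟩ | ⟨hst, hs⟩ | ⟨hst, hs⟩ <;>
      subst hst <;> subst hs <;>
      by_cases h1 : ch = '\'' <;> by_cases h2 : ch = '"' <;> by_cases h3 : ch = '#' <;>
      simp_all [pvHashIdxA, pvHashIdxB, pvPopWhileMem, pvOnSquote, pvOnDquote] <;>
      exact ih _ _ _ _ (by unfold QRel; simp)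

-- ===== VERDICT (by name: the statement is the Claim_ definition above) =====
theorem erase_hash_comment_py_spec : Claim_equal_erase_hash_comment_py := by
  intro lines _
  unfold Spec_erase_hash_comment_py erase_hash_comment_py erase_hash_comment_py_alt
  refine List.map_congr_left ?_
  intro line _
  have h := hashIdx_eq line.toList 0 [] 0 line.length (Or.inl ⟨rfl, rfl⟩)
  simp [h]
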